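-- pv_equiv track=rewrite | github.com/james5635/GeekForGeek-Data-Structure-and-Algorithm | hashing/easy/min_subsets_distinct/solution.py | form_subsets
-- ===== SOURCE A (Python) =====
-- from collections import Counter
--
-- def form_subsets(arr):
--     """
--     Actually form the subsets (for verification).
--
--     Args:
--         arr: List of integers
--
--     Returns:
--         List of subsets with distinct elements
--     """
--     if not arr:
--         return []
--
--     from collections import defaultdict
--
--     freq = Counter(arr)
--     num_subsets = max(freq.values())
--
--     # Create empty subsets
--     subsets = [[] for _ in range(num_subsets)]
--
--     # Track next available subset for each element
--     next_subset = defaultdict(int)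
--
--     for num in arr:
--         subset_idx = next_subset[num]
--         subsets[subset_idx].append(num)
--         next_subset[num] += 1
--
--     return subsets
-- ===== SOURCE B (Python) =====
-- def form_subsets(arr):
--     """
--     Actually form the subsets (for verification).
--
--     Args:
--         arr: List of integers
--
--     Returns:
--         List of subsets with distinct elements
--     """
--     if not arr:
--         return []
--     ranks = [arr[:pos].count(x) for pos, x in enumerate(arr)]
--     return [[x for x, r in zip(arr, ranks) if r == i] for i in range(max(ranks) + 1)]
-- ===== Notes on version B (the rewrite author's own statement) =====
-- stated objective: alternative
-- what changed: B computes each occurrence's rank directly as the count of equal elements in the preceding prefix, then groups elements by rank with one comprehension per rank; no dict/Counter and no incremental subset state at all, trading A's linear stateful distribution for a stateless quadratic rank-and-group formulation.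
import Mathlib
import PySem

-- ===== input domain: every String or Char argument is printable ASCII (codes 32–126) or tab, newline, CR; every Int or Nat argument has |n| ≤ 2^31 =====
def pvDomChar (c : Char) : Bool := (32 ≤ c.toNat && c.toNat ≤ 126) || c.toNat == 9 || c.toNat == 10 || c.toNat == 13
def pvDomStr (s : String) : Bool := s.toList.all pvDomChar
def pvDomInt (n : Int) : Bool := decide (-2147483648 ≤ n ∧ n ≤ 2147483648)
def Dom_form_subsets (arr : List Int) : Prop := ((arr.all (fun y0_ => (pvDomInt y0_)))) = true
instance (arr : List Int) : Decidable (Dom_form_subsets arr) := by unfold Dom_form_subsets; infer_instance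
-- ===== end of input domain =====

-- B replaces A's stateful Counter-then-distribute loop by a stateless rank-and-group
-- formulation: each occurrence's rank is its count in the preceding prefix, and subset i
-- collects the elements of rank i; no dict and no incremental subset state (alternative, not faster).

-- ===== PORT A =====
-- `l[i].append(x)`: exact for 0 ≤ i < l.length (Python raises IndexError otherwise;
-- A only ever indexes in range, which the proofs below establish).
def appendAt : List (List Int) → Int → Int → List (List Int)
  | [], _, _ => []
  | s :: rest, i, x => if i = 0 then (s ++ [x]) :: rest else s :: appendAt rest (i - 1) x

-- loop body of A: subset_idx = next_subset[num] (defaultdict 0); subsets[subset_idx].append(num);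
-- next_subset[num] += 1   (defaultdict read+increment ported as getD then insert)
def stepA (st : List (List Int) × PySem.Dict Int Int) (num : Int) :
    List (List Int) × PySem.Dict Int Int :=
  let idx := st.2.getD num 0
  (appendAt st.1 idx num, st.2.insert num (idx + 1))

def form_subsets (arr : List Int) : List (List Int) :=
  if arr = [] then []
  else
    let freq := PySem.Dict.counter arr
    match PySem.List.max? freq.values (fun v => v) with  -- max(freq.values()); values ≠ [] since arr ≠ []
    | none => []
    | some numSubsets =>
      let subsets := (PySem.List.pyRange 0 numSubsets 1).map (fun _ => ([] : List Int))
      (arr.foldl stepA (subsets, PySem.Dict.empty)).1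

-- ===== PORT B =====
-- ranks = [arr[:pos].count(x) for pos, x in enumerate(arr)]
def ranksOf (arr : List Int) : List Int :=
  (PySem.List.enumerate arr).map (fun p => ((PySem.List.slice arr none (some p.1)).count p.2 : Int))

-- return [[x for x, r in zip(arr, ranks) if r == i] for i in range(max(ranks) + 1)]
def form_subsets_alt (arr : List Int) : List (List Int) :=
  if arr = [] then []
  else
    match PySem.List.max? (ranksOf arr) (fun v => v) with  -- max(ranks); ranks ≠ [] since arr ≠ []
    | none => []
    | some m =>
      (PySem.List.pyRange 0 (m + 1) 1).map
        (fun i => ((arr.zip (ranksOf arr)).filter (fun p => p.2 = i)).map Prod.fst)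

-- ===== PRECONDITION & SPEC =====
def Spec_form_subsets (arr : List Int) (out : List (List Int)) : Prop := out = form_subsets_alt arr
instance (arr : List Int) (out : List (List Int)) : Decidable (Spec_form_subsets arr out) := by unfold Spec_form_subsets; infer_instance

-- ===== CLAIM (what is proved, stated in full; the proofs are below) =====
def Claim_equal_form_subsets : Prop := ∀ (arr : List Int), Dom_form_subsets arr → Spec_form_subsets arr (form_subsets arr)

-- ===== LEMMAS AND PROOFS =====

-- elements of l whose "rank" (count of equal elements before them, `seen` already passed) is i
def occ (seen : List Int) (l : List Int) (i : Int) : List Int :=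
  match l with
  | [] => []
  | x :: t => (if (seen.count x : Int) = i then [x] else []) ++ occ (seen ++ [x]) t i

theorem occ_snoc (l : List Int) (seen : List Int) (x : Int) (i : Int) :
    occ seen (l ++ [x]) i = occ seen l i ++ (if ((seen ++ l).count x : Int) = i then [x] else []) := by
  induction l generalizing seen with
  | nil => simp [occ]
  | cons a t ih =>
    simp only [List.cons_append, occ, ih (seen ++ [a]), List.append_assoc]
    simp

theorem appendAt_append_lt (a b : List (List Int)) (i x : Int)
    (h0 : 0 ≤ i) (h : i < (a.length : Int)) :
    appendAt (a ++ b) i x = appendAt a i x ++ b := by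
  induction a generalizing i with
  | nil => simp at h; omega
  | cons s rest ih =>
    simp only [List.cons_append, appendAt]
    split
    · rfl
    · rw [ih (i - 1) (by omega) (by simp at h ⊢; omega)]; simp

theorem appendAt_append_len (a : List (List Int)) (c : List Int) (b : List (List Int)) (x : Int) :
    appendAt (a ++ c :: b) (a.length : Int) x = a ++ (c ++ [x]) :: b := by
  induction a with
  | nil => simp [appendAt]
  | cons s rest ih =>
    simp only [List.cons_append, appendAt, List.length_cons]
    rw [if_neg (by push_cast; omega)]
    have h1 : ((rest.length + 1 : Nat) : Int) - 1 = (rest.length : Int) := by push_cast; omega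
    rw [h1, ih]

theorem appendAt_map_range (f : Nat → List Int) (x : Int) (n i : Nat) (h : i < n) :
    appendAt ((List.range n).map f) (i : Int) x
      = (List.range n).map (fun j => if j = i then f j ++ [x] else f j) := by
  induction n with
  | zero => omega
  | succ n ihn =>
    rw [List.range_succ, List.map_append, List.map_append]
    by_cases hi : i = n
    · subst hi
      have hlen : ((List.range i).map f).length = i := by simp
      have := appendAt_append_len ((List.range i).map f) (f i) [] x
      rw [hlen] at this
      simp only [List.map_cons, List.map_nil] at this ⊢
      rw [this]
      congr 1
      apply List.map_congr_left
      intro j hj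
      rw [List.mem_range] at hj
      rw [if_neg (by omega)]
    · have hin : i < n := by omega
      rw [appendAt_append_lt _ _ _ _ (by positivity) (by simp; omega), ihn hin]
      congr 1
      simp only [List.map_cons, List.map_nil]
      rw [if_neg (by omega)]

-- A's loop invariant: after processing `pref`, subset j holds exactly the rank-j elements of pref.
theorem loopA (rest : List Int) : ∀ (pref : List Int) (d : PySem.Dict Int Int) (N : Nat),
    (∀ x, d.getD x 0 = (pref.count x : Int)) →
    (∀ x ∈ rest, pref.count x + rest.count x ≤ N) →
    (rest.foldl stepA ((List.range N).map (fun j : Nat => occ [] pref (j : Int)), d)).1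
      = (List.range N).map (fun j : Nat => occ [] (pref ++ rest) (j : Int)) := by
  induction rest with
  | nil => intro pref d N _ _; simp
  | cons num tl ih =>
    intro pref d N hd hc
    simp only [List.foldl_cons, stepA]
    rw [hd num]
    have hlt : pref.count num < N := by
      have h1 := hc num (by simp)
      have h2 : 1 ≤ (num :: tl).count num := by simp
      omega
    rw [appendAt_map_range _ _ _ _ hlt]
    have hmap : ((List.range N).map (fun j : Nat => if j = pref.count num then occ [] pref (j : Int) ++ [num] else occ [] pref (j : Int)))
        = (List.range N).map (fun j : Nat => occ [] (pref ++ [num]) (j : Int)) := by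
      apply List.map_congr_left
      intro j _
      rw [occ_snoc, List.nil_append]
      by_cases h : j = pref.count num
      · subst h; simp
      · rw [if_neg h, if_neg (by intro hh; exact h (by exact_mod_cast hh.symm))]
        simp
    rw [hmap]
    have hd' : ∀ x, (d.insert num (d.getD num 0 + 1)).getD x 0 = (((pref ++ [num]).count x : Nat) : Int) := by
      intro x
      rw [PySem.Dict.getD_insert]
      by_cases hx : x = num
      · rw [if_pos hx, hd num, hx]
        simp [List.count_append]
      · rw [if_neg hx, hd x]
        have : [num].count x = 0 := by
          rw [List.count_singleton']
          simp [Ne.symm hx]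
        simp [List.count_append, this]
    have hc' : ∀ x ∈ tl, (pref ++ [num]).count x + tl.count x ≤ N := by
      intro x hx
      have h1 := hc x (List.mem_cons_of_mem _ hx)
      by_cases hxn : x = num
      · subst hxn
        simp only [List.count_cons_self] at h1
        simp [List.count_append]
        omega
      · have e1 : (num :: tl).count x = tl.count x := by
          simp [Ne.symm hxn]
        have e2 : [num].count x = 0 := by
          rw [List.count_singleton']
          simp [Ne.symm hxn]
        rw [e1] at h1
        simp [List.count_append, e2]
        omega
    have hstep := ih (pref ++ [num]) (d.insert num (d.getD num 0 + 1)) N hd' hc'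
    rw [hd num] at hstep
    rw [hstep, List.append_assoc]
    rfl

theorem ranksOf_nil : ranksOf [] = [] := by
  simp [ranksOf, PySem.List.enumerate_nil]

theorem length_ranksOf (l : List Int) : (ranksOf l).length = l.length := by
  simp [ranksOf, PySem.List.length_enumerate]

theorem ranksOf_snoc (l : List Int) (x : Int) :
    ranksOf (l ++ [x]) = ranksOf l ++ [(l.count x : Int)] := by
  unfold ranksOf
  rw [PySem.List.enumerate_append, List.map_append]
  congr 1
  · apply List.map_congr_left
    intro p hp
    rw [PySem.List.mem_enumerate_iff] at hp
    obtain ⟨k, hk, rfl⟩ := hp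
    simp only [zero_add]
    rw [PySem.List.slice_to_natCast, PySem.List.slice_to_natCast,
        List.take_append_of_le_length (le_of_lt hk)]
  · simp only [PySem.List.enumerate_cons, PySem.List.enumerate_nil, List.map_cons, List.map_nil,
      zero_add]
    rw [PySem.List.slice_to_natCast]
    rw [List.take_left]

theorem mem_ranksOf (l : List Int) : ∀ r ∈ ranksOf l, ∃ x, x ∈ l ∧ r < (l.count x : Int) := by
  induction l using List.reverseRecOn with
  | nil => intro r hr; rw [ranksOf_nil] at hr; simp at hr
  | append_singleton l y ih =>
    intro r hr
    rw [ranksOf_snoc, List.mem_append] at hr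
    rcases hr with h | h
    · obtain ⟨x, hx, hcx⟩ := ih r h
      refine ⟨x, by simp [hx], ?_⟩
      have : l.count x ≤ (l ++ [y]).count x := by simp [List.count_append]
      have hcast : (l.count x : Int) ≤ ((l ++ [y]).count x : Int) := by exact_mod_cast this
      omega
    · simp only [List.mem_singleton] at h
      subst h
      refine ⟨y, by simp, ?_⟩
      have : (l ++ [y]).count y = l.count y + 1 := by simp [List.count_append]
      rw [this]
      push_cast
      omega

theorem count_mem_ranksOf (x : Int) (l : List Int) :
    ∀ j : Nat, j < l.count x → ((j : Nat) : Int) ∈ ranksOf l := by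
  induction l using List.reverseRecOn with
  | nil => intro j hj; simp at hj
  | append_singleton l y ih =>
    intro j hj
    rw [ranksOf_snoc, List.mem_append]
    by_cases hxy : x = y
    · subst hxy
      have : (l ++ [x]).count x = l.count x + 1 := by simp [List.count_append]
      rw [this] at hj
      by_cases hjl : j < l.count x
      · exact Or.inl (ih j hjl)
      · have : j = l.count x := by omega
        subst this
        simp
    · have e : [y].count x = 0 := by simp [List.count_singleton]; exact fun h => hxy h.symm
      have : (l ++ [y]).count x = l.count x := by simp [List.count_append, e]
      rw [this] at hj
      exact Or.inl (ih j hj)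

theorem zip_ranks_filter (l : List Int) (i : Int) :
    (((l.zip (ranksOf l)).filter (fun p => p.2 = i)).map Prod.fst) = occ [] l i := by
  induction l using List.reverseRecOn with
  | nil => simp [ranksOf_nil, occ]
  | append_singleton l x ih =>
    rw [ranksOf_snoc,
        List.zip_append (by rw [length_ranksOf]),
        List.filter_append, List.map_append, ih, occ_snoc, List.nil_append]
    congr 1
    by_cases h : (l.count x : Int) = i
    · simp [List.filter, h]
    · simp [List.filter, h]

-- ===== VERDICT (by name: the statement is the Claim_ definition above) =====
theorem form_subsets_spec : Claim_equal_form_subsets := by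
  intro arr _
  unfold Spec_form_subsets form_subsets form_subsets_alt
  by_cases harr : arr = []
  · subst harr; simp
  · rw [if_neg harr, if_neg harr]
    -- A's side: extract N = max frequency from the Counter
    have hkeys : (PySem.Dict.counter arr).keys = PySem.Set.ofList arr := PySem.Dict.keys_counter arr
    have hmemk : ∀ x ∈ arr, x ∈ (PySem.Dict.counter arr).keys := by
      intro x hx; rw [hkeys]; exact (PySem.Set.mem_ofList _ _).2 hx
    have hvne : (PySem.Dict.counter arr).values ≠ [] := by
      obtain ⟨h, t, rfl⟩ := List.exists_cons_of_ne_nil harr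
      have := hmemk h (by simp)
      simp only [PySem.Dict.keys] at this
      simp only [PySem.Dict.values]
      intro hc
      rw [List.map_eq_nil_iff] at hc
      rw [hc] at this
      simp at this
    cases hm : PySem.List.max? (PySem.Dict.counter arr).values (fun v => v) with
    | none => exact absurd ((PySem.List.max?_eq_none_iff _ _).1 hm) hvne
    | some N =>
      have hvals : (PySem.Dict.counter arr).values
          = (PySem.Dict.counter arr).keys.map (fun k => (PySem.Dict.counter arr).getD k 0) :=
        PySem.Dict.values_eq_map_keys _ (PySem.Dict.nodup_keys_counter arr) 0
      have hNmem : N ∈ (PySem.Dict.counter arr).values := PySem.List.max?_mem hm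
      rw [hvals, List.mem_map] at hNmem
      obtain ⟨y, hyk, hyv⟩ := hNmem
      rw [PySem.Dict.getD_counter] at hyv
      have hyarr : y ∈ arr := by rw [hkeys, PySem.Set.mem_ofList _ _] at hyk; exact hyk
      have hN1 : 1 ≤ N := by
        rw [← hyv]; exact_mod_cast List.one_le_count_iff.2 hyarr
      have hmax : ∀ x ∈ arr, ((arr.count x : Int)) ≤ N := by
        intro x hx
        have hxv : ((arr.count x : Int)) ∈ (PySem.Dict.counter arr).values := by
          rw [hvals, List.mem_map]
          exact ⟨x, hmemk x hx, by rw [PySem.Dict.getD_counter]⟩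
        simpa using PySem.List.max?_isMax hm _ hxv
      -- A's result via the loop invariant
      have hinit : (PySem.List.pyRange 0 N 1).map (fun _ => ([] : List Int))
          = (List.range N.toNat).map (fun j : Nat => occ [] [] (j : Int)) := by
        rw [PySem.List.pyRange_one, List.map_map]
        norm_num
        intro a _
        rfl
      have hA := loopA arr [] PySem.Dict.empty N.toNat
        (by intro x; simp [PySem.Dict.getD_empty])
        (by intro x hx; have := hmax x hx; simp only [List.count_nil, Nat.zero_add]; omega)
      simp only [List.nil_append] at hA
      simp only [hm]
      rw [hinit, hA]
      -- B's side: max(ranks) = N - 1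
      have hrne : ranksOf arr ≠ [] := by
        intro h
        apply harr
        have := congrArg List.length h
        rw [length_ranksOf] at this
        simpa [List.length_eq_zero_iff] using this
      cases hmr : PySem.List.max? (ranksOf arr) (fun v => v) with
      | none => exact absurd ((PySem.List.max?_eq_none_iff _ _).1 hmr) hrne
      | some M =>
        dsimp only
        have hMmem := PySem.List.max?_mem hmr
        obtain ⟨x0, hx0, hMlt⟩ := mem_ranksOf arr M hMmem
        have hub : M ≤ N - 1 := by have := hmax x0 hx0; omega
        have hy1 : 1 ≤ arr.count y := by
          have : (1 : Int) ≤ (arr.count y : Int) := by omega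
          exact_mod_cast this
        have hNm := count_mem_ranksOf y arr (arr.count y - 1) (by omega)
        have hlb := PySem.List.max?_isMax hmr _ hNm
        have hM : M + 1 = N := by
          have hcast : ((arr.count y - 1 : Nat) : Int) = (arr.count y : Int) - 1 := by
            push_cast [hy1]; ring
          rw [hcast] at hlb
          omega
        rw [hM, PySem.List.pyRange_one]
        norm_num
        intro k _
        exact (zip_ranks_filter arr (k : Int)).symm
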